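-- pv_equiv track=rewrite | github.com/sanadlab/builDroid | autogpt/commands/docker_helpers_static.py | parse_screen_sesssion_id
-- ===== SOURCE A (Python) =====
-- def parse_screen_sesssion_id(screen_ls):
--     lines = screen_ls.splitlines()
--
--     for line in lines:
--         if ".my_screen_session" in line:
--             wanted_line = line
--             break
--     else:
--         raise ValueError("ERROR: This is not possible, my_screen_session should be there")
--
--     line_parts = wanted_line.split()
--     for part in line_parts:
--         if ".my_screen_session" in part:
--             wanted_part = part
--             break
--     else:
--         raise ValueError("ERROR 2: This is not possible, my_screen_session should be there")
--
--     return wanted_part.split(".")[0]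
-- ===== SOURCE B (Python) =====
-- def parse_screen_sesssion_id(screen_ls):
--     # One flat pass over whitespace-separated tokens of the whole output;
--     # no splitlines, no nested loop, no second (unreachable) error branch.
--     for tok in screen_ls.split():
--         if ".my_screen_session" in tok:
--             return tok.split(".")[0]
--     raise ValueError("ERROR: This is not possible, my_screen_session should be there")
-- ===== Notes on version B (the rewrite author's own statement) =====
-- stated objective: idiomatic
-- what changed: A finds the first line of splitlines() containing '.my_screen_session' and then scans that line's whitespace tokens in a second nested loop (plus an unreachable second error branch); B is one flat loop over the whitespace tokens of the whole string (str.split()), returning the prefix before the first '.' of the first matching token.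
import Mathlib
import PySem

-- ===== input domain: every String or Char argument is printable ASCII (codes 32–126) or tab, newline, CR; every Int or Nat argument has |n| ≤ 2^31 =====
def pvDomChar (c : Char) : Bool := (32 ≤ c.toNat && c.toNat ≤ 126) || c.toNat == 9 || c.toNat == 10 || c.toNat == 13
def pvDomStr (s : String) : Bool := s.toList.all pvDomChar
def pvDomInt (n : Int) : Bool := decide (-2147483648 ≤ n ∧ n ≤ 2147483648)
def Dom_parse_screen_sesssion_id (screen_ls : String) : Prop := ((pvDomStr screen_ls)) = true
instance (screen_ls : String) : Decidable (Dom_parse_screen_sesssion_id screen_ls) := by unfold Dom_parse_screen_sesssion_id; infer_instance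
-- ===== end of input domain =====

-- B replaces A's nested loops (first matching line of splitlines(), then first matching
-- whitespace token of that line) by ONE flat loop over the whitespace tokens of the whole
-- string (idiomatic; same cost); A's second error branch disappears because it is unreachable.

-- ===== PORT A =====
def parse_screen_sesssion_id (screen_ls : String) : String :=
  -- for line in screen_ls.splitlines(): if ".my_screen_session" in line: break / else: raise
  match (PySem.Str.splitlines screen_ls).find? (fun line => PySem.Str.isIn ".my_screen_session" line) with
  | none => ""  -- Python raises ValueError here; excluded by Pre_
  | some wanted_line =>
    -- for part in wanted_line.split(): if ".my_screen_session" in part: break / else: raise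
    match (PySem.Str.split₀ wanted_line).find? (fun part => PySem.Str.isIn ".my_screen_session" part) with
    | none => ""  -- Python raises ValueError ("ERROR 2") here; unreachable when the outer loop found a line
    | some wanted_part =>
      -- wanted_part.split(".")[0]; split with a non-empty separator never returns an
      -- empty list, so headD is exact (the [0] IndexError cannot occur)
      (((PySem.Str.split? wanted_part ".").getD []).headD "")

-- ===== PORT B =====
def parse_screen_sesssion_id_alt (screen_ls : String) : String :=
  -- for tok in screen_ls.split(): if ".my_screen_session" in tok: return tok.split(".")[0] / raise
  match (PySem.Str.split₀ screen_ls).find? (fun tok => PySem.Str.isIn ".my_screen_session" tok) with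
  | some tok => (((PySem.Str.split? tok ".").getD []).headD "")  -- split(".") never empty, headD exact
  | none => ""  -- Python raises ValueError here; excluded by Pre_

-- ===== PRECONDITION & SPEC =====
-- Pre_ excludes exactly the inputs without the sentinel substring, on which Python A
-- (and Python B) raises ValueError.
def Pre_parse_screen_sesssion_id (screen_ls : String) : Prop :=
  PySem.Str.isIn ".my_screen_session" screen_ls = true
instance (screen_ls : String) : Decidable (Pre_parse_screen_sesssion_id screen_ls) := by
  unfold Pre_parse_screen_sesssion_id; infer_instance

def pvWitness_parse_screen_sesssion_id : String :=
  "There is a screen on:\r\n\t12345.my_screen_session\t(Detached)\n1 Socket in /run/screen.\n"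

def Spec_parse_screen_sesssion_id (screen_ls : String) (out : String) : Prop := out = parse_screen_sesssion_id_alt screen_ls
instance (screen_ls : String) (out : String) : Decidable (Spec_parse_screen_sesssion_id screen_ls out) := by unfold Spec_parse_screen_sesssion_id; infer_instance

-- ===== CLAIM (what is proved, stated in full; the proofs are below) =====
def Claim_equal_parse_screen_sesssion_id : Prop := ∀ (screen_ls : String), Dom_parse_screen_sesssion_id screen_ls → Pre_parse_screen_sesssion_id screen_ls → Spec_parse_screen_sesssion_id screen_ls (parse_screen_sesssion_id screen_ls)

-- ===== LEMMAS AND PROOFS =====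

-- the sentinel, the token predicate, the splitlines break predicate, a simple span-style
-- tokenizer and a separator-chopper: proof vehicles relating split() to splitlines()+split()
def pvSent : List Char := ".my_screen_session".toList

def pvTok (t : List Char) : Bool := PySem.Chars.isIn pvSent t

def pvBrk (c : Char) : Bool :=
  have n := c.toNat
  decide (n = 10) || decide (n = 13) || decide (n = 11) || decide (n = 12) || decide (n = 28) ||
    decide (n = 29) || decide (n = 30) || decide (n = 133) || decide (n = 8232) || decide (n = 8233)

def pvToks : List Char → List (List Char)
  | [] => []
  | c :: r =>
    if PySem.Chars.isspace c then pvToks r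
    else (c :: r.takeWhile (fun d => !PySem.Chars.isspace d)) ::
      pvToks (r.dropWhile (fun d => !PySem.Chars.isspace d))
termination_by s => s.length
decreasing_by
  · simp
  · simpa using Nat.lt_succ_of_le (List.length_dropWhile_le _ _)

def pvChop : List Char → List Char
  | '\x0d' :: '\n' :: r => r
  | _ :: r => r
  | [] => []

theorem pvBrk_isspace {c : Char} (h : pvBrk c = true) : PySem.Chars.isspace c = true := by
  simp [PySem.Chars.isspace, pvBrk] at *; omega

theorem pvSent_nonspace_all : pvSent.all (fun c => !PySem.Chars.isspace c) = true := by rfl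

theorem pvSent_nonspace : ∀ c ∈ pvSent, PySem.Chars.isspace c = false := by
  have := List.all_eq_true.mp pvSent_nonspace_all
  intro c hc
  simpa using this c hc

theorem pvSent_ne_nil : pvSent ≠ [] := by decide

theorem dropWhile_head_false {p : Char → Bool} {l : List Char} {c : Char} {t : List Char}
    (h : l.dropWhile p = c :: t) : p c = false := by
  induction l with
  | nil => simp at h
  | cons a l ih =>
    rw [List.dropWhile_cons] at h
    by_cases hp : p a
    · exact ih (by simpa [hp] using h)
    · rw [if_neg (by simp [hp])] at h
      cases h
      exact Bool.eq_false_iff.mpr hp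

theorem pv_cross {a : List Char} {w : Char} {b' u : List Char}
    (h : u <:+: a ++ (w :: b')) : u <:+: a ∨ u <:+: (w :: b') ∨ w ∈ u := by
  induction a with
  | nil => exact Or.inr (Or.inl (by simpa using h))
  | cons c a' ih =>
    rw [List.cons_append, List.infix_cons_iff] at h
    rcases h with hp | hi
    · by_cases hlen : u.length ≤ (c :: a').length
      · left
        exact List.prefix_of_prefix_length_le hp (List.prefix_append _ _) hlen |>.isInfix
      · right; right
        have hku : (c :: a').length < u.length := by omega
        obtain ⟨v, hv⟩ := hp
        have e : u[(c :: a').length]? = some w := by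
          rw [← List.getElem?_append_left (l₂ := v) hku, hv]
          rw [← List.cons_append]
          rw [List.getElem?_append_right (le_refl _)]
          simp
        exact List.mem_of_getElem? e
    · rcases ih hi with h1 | h2 | h3
      · exact Or.inl (h1.trans (List.suffix_cons c a').isInfix)
      · exact Or.inr (Or.inl h2)
      · exact Or.inr (Or.inr h3)

theorem split₀_go_acc (s : List Char) (cur : List Char) (acc : List (List Char)) :
    PySem.Chars.split₀.go s cur acc = acc.reverse ++ PySem.Chars.split₀.go s cur [] := by
  induction s generalizing cur acc with
  | nil => simp [PySem.Chars.split₀.go]; split <;> simp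
  | cons c r ih =>
    simp only [PySem.Chars.split₀.go]
    split
    · split
      · rw [ih [] acc]
      · rw [ih [] (cur.reverse :: acc), ih [] [cur.reverse]]; simp
    · rw [ih (c :: cur) acc]

theorem split₀_go_toks (s : List Char) (cur : List Char) :
    PySem.Chars.split₀.go s cur [] =
      if cur.isEmpty then pvToks s
      else (cur.reverse ++ s.takeWhile (fun d => !PySem.Chars.isspace d)) ::
        pvToks (s.dropWhile (fun d => !PySem.Chars.isspace d)) := by
  induction s generalizing cur with
  | nil =>
    simp only [PySem.Chars.split₀.go]
    split <;> simp [pvToks]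
  | cons c r ih =>
    simp only [PySem.Chars.split₀.go]
    by_cases hs : PySem.Chars.isspace c
    · simp only [hs, if_true]
      split
      · rename_i hcur
        rw [ih []]; simp_all [pvToks]
      · rename_i hcur
        rw [split₀_go_acc, ih []]
        simp_all [pvToks]
    · simp only [hs]
      rw [ih (c :: cur)]
      simp only [pvToks, hs, Bool.false_eq_true]
      split <;> simp_all

theorem split₀_eq_pvToks (s : List Char) : PySem.Chars.split₀ s = pvToks s := by
  rw [PySem.Chars.split₀, split₀_go_toks]; rfl

theorem splitlines_go_acc (b : Char → Bool) (s cur : List Char) (acc : List (List Char)) :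
    PySem.Chars.splitlines.go b s cur acc = acc.reverse ++ PySem.Chars.splitlines.go b s cur [] := by
  induction hn : s.length using Nat.strong_induction_on generalizing s cur acc with
  | _ n ih =>
  subst hn
  rw [PySem.Chars.splitlines.go.eq_def]
  conv_rhs => rw [PySem.Chars.splitlines.go.eq_def]
  split
  · split <;> simp
  · rename_i rest cur' acc'
    rw [ih acc'.length (by simp) acc' [] (cur.reverse :: acc) rfl,
        ih acc'.length (by simp) acc' [] [cur.reverse] rfl]
    simp
  · rename_i x c rest hne
    split
    · rw [ih rest.length (by simp) rest [] (cur.reverse :: acc) rfl,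
          ih rest.length (by simp) rest [] [cur.reverse] rfl]
      simp
    · exact ih rest.length (by simp) rest (c :: cur) acc rfl

theorem splitlines_eq_go (s : List Char) :
    PySem.Chars.splitlines s = PySem.Chars.splitlines.go pvBrk s [] [] := rfl

theorem pvChop_cons {c : Char} {rest : List Char}
    (hne : ∀ (r : List Char), c = '\x0d' → rest = '\n' :: r → False) :
    pvChop (c :: rest) = rest := by
  rw [pvChop.eq_def]
  split
  · rename_i r heq
    cases heq
    exact absurd (hne r rfl rfl) (fun h => h)
  · rename_i x r heq
    cases heq
    rfl
  · rename_i heq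
    cases heq

theorem splitlines_go_eq (s : List Char) (cur : List Char) :
    PySem.Chars.splitlines.go pvBrk s cur [] =
      if cur.isEmpty ∧ s.isEmpty then []
      else (cur.reverse ++ s.takeWhile (fun c => !pvBrk c)) ::
        PySem.Chars.splitlines (pvChop (s.dropWhile (fun c => !pvBrk c))) := by
  induction hn : s.length using Nat.strong_induction_on generalizing s cur with
  | _ n ih =>
  subst hn
  rw [PySem.Chars.splitlines.go.eq_def]
  split
  · split <;> rename_i h <;> simp_all [pvChop, splitlines_eq_go, PySem.Chars.splitlines.go]
  · rename_i rest cur' acc'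
    rw [splitlines_go_acc, splitlines_eq_go]
    have hbr : pvBrk '\x0d' = true := by decide
    simp [hbr, pvChop]
  · rename_i cur0 u1 u2 x c rest hne
    split <;> rename_i hb
    · rw [splitlines_go_acc, splitlines_eq_go]
      simp [hb, pvChop_cons hne]
    · rw [ih rest.length (by simp) rest (c :: cur0) rfl]
      simp [hb]

theorem splitlines_cons (s : List Char) :
    PySem.Chars.splitlines s =
      if s.isEmpty then []
      else (s.takeWhile (fun c => !pvBrk c)) ::
        PySem.Chars.splitlines (pvChop (s.dropWhile (fun c => !pvBrk c))) := by
  rw [splitlines_eq_go, splitlines_go_eq]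
  simp

theorem pvToks_cons_space {c : Char} (r : List Char) (h : PySem.Chars.isspace c = true) :
    pvToks (c :: r) = pvToks r := by
  rw [pvToks]; simp [h]

theorem pvToks_append (a z : List Char)
    (hz : z = [] ∨ ∃ c r, z = c :: r ∧ PySem.Chars.isspace c = true) :
    pvToks (a ++ z) = pvToks a ++ pvToks z := by
  induction hn : a.length using Nat.strong_induction_on generalizing a with
  | _ n ih =>
  subst hn
  match a with
  | [] => simp [pvToks]
  | c :: r =>
    by_cases hs : PySem.Chars.isspace c
    · simp only [List.cons_append, pvToks, hs, if_true]
      exact ih r.length (by simp) r rfl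
    · simp only [List.cons_append, pvToks, hs, if_false, Bool.false_eq_true]
      rw [List.takeWhile_append, List.dropWhile_append]
      by_cases hd : (List.dropWhile (fun d => !PySem.Chars.isspace d) r).isEmpty
      · -- all of r is non-space
        have hr : List.takeWhile (fun d => !PySem.Chars.isspace d) r = r := by
          have := List.takeWhile_append_dropWhile (p := fun d => !PySem.Chars.isspace d) (l := r)
          rw [List.isEmpty_iff.mp hd, List.append_nil] at this
          exact this
        have htz : List.takeWhile (fun d => !PySem.Chars.isspace d) z = [] := by
          rcases hz with rfl | ⟨w, t, rfl, hw⟩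
          · rfl
          · simp [hw]
        have hdz : List.dropWhile (fun d => !PySem.Chars.isspace d) z = z := by
          rcases hz with rfl | ⟨w, t, rfl, hw⟩
          · rfl
          · simp [hw]
        simp only [hr, htz, hdz, hd, if_true, List.append_nil]
        rw [List.isEmpty_iff.mp hd]
        simp [pvToks]
      · simp only [hd]
        have hlen : ¬ (List.takeWhile (fun d => !PySem.Chars.isspace d) r).length = r.length := by
          intro hcon
          have := List.takeWhile_append_dropWhile (p := fun d => !PySem.Chars.isspace d) (l := r)
          have hla := congrArg List.length this
          rw [List.length_append, hcon] at hla
          have h2 : (List.dropWhile (fun d => !PySem.Chars.isspace d) r).length = 0 := by omega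
          exact hd (List.isEmpty_iff.mpr (List.length_eq_zero_iff.mp h2))
        simp only [hlen, if_false, Bool.false_eq_true]
        congr 1
        have hlt : (List.dropWhile (fun d => !PySem.Chars.isspace d) r).length ≤ r.length := List.length_dropWhile_le _ _
        have := ih (List.dropWhile (fun d => !PySem.Chars.isspace d) r).length (by simpa using Nat.lt_succ_of_le hlt) (List.dropWhile (fun d => !PySem.Chars.isspace d) r) rfl
        exact this

theorem pvToks_pvChop (Z : List Char) (hZ : Z = [] ∨ ∃ c t, Z = c :: t ∧ pvBrk c = true) :
    pvToks Z = pvToks (pvChop Z) := by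
  rcases hZ with rfl | ⟨c, t, rfl, hc⟩
  · rfl
  · by_cases hcr : c = '\x0d' ∧ ∃ t', t = '\n' :: t'
    · obtain ⟨rfl, t', rfl⟩ := hcr
      rw [show pvChop ('\x0d' :: '\n' :: t') = t' from rfl]
      rw [pvToks_cons_space _ (by decide), pvToks_cons_space _ (by decide)]
    · have hch : pvChop (c :: t) = t := by
        rw [pvChop.eq_def]
        split
        · rename_i r heq
          cases heq
          exact absurd ⟨rfl, r, rfl⟩ hcr
        · rename_i x r heq; cases heq; rfl
        · rename_i heq; cases heq
      rw [hch, pvToks_cons_space _ (pvBrk_isspace hc)]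

theorem pvChop_length_lt {Z : List Char} (h : Z ≠ []) : (pvChop Z).length < Z.length := by
  rw [pvChop.eq_def]
  split
  · simp
  · simp
  · simp_all

theorem pvToks_splitlines (s : List Char) :
    pvToks s = (PySem.Chars.splitlines s).flatMap pvToks := by
  induction hn : s.length using Nat.strong_induction_on generalizing s with
  | _ n ih =>
  subst hn
  rw [splitlines_cons]
  by_cases hs : s.isEmpty
  · rw [if_pos hs, List.isEmpty_iff.mp hs]; simp [pvToks]
  · simp only [hs, if_false, Bool.false_eq_true, List.flatMap_cons]
    have hsplit := List.takeWhile_append_dropWhile (p := fun c => !pvBrk c) (l := s)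
    set L := s.takeWhile (fun c => !pvBrk c) with hL
    set Z := s.dropWhile (fun c => !pvBrk c) with hZ
    have hZshape : Z = [] ∨ ∃ c t, Z = c :: t ∧ pvBrk c = true := by
      rcases hzz : Z with _ | ⟨c, t⟩
      · exact Or.inl rfl
      · refine Or.inr ⟨c, t, rfl, ?_⟩
        have := dropWhile_head_false (p := fun c => !pvBrk c) (l := s) (hZ ▸ hzz)
        simpa using this
    have hzlt : (pvChop Z).length < s.length := by
      rcases hZshape with hz0 | ⟨c, t, hzz, _⟩
      · rw [hz0]; simp [pvChop]
        exact List.length_pos_iff.mpr (by simpa using hs)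
      · calc (pvChop Z).length < Z.length := pvChop_length_lt (by rw [hzz]; simp)
          _ ≤ s.length := by rw [hZ]; exact List.length_dropWhile_le _ _
    have hspace : Z = [] ∨ ∃ c r, Z = c :: r ∧ PySem.Chars.isspace c = true := by
      rcases hZshape with hz0 | ⟨c, t, hzz, hc⟩
      · exact Or.inl hz0
      · exact Or.inr ⟨c, t, hzz, pvBrk_isspace hc⟩
    calc pvToks s = pvToks (L ++ Z) := by rw [hsplit]
      _ = pvToks L ++ pvToks Z := pvToks_append L Z hspace
      _ = pvToks L ++ pvToks (pvChop Z) := by rw [← pvToks_pvChop Z hZshape]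
      _ = pvToks L ++ (PySem.Chars.splitlines (pvChop Z)).flatMap pvToks := by
          rw [← ih (pvChop Z).length hzlt (pvChop Z) rfl]

theorem pvToks_infix : ∀ (s : List Char), ∀ t ∈ pvToks s, t <:+: s := by
  intro s
  induction hn : s.length using Nat.strong_induction_on generalizing s with
  | _ n ih =>
  subst hn
  match s with
  | [] => intro t ht; simp [pvToks] at ht
  | c :: r =>
    intro t ht
    rw [pvToks] at ht
    by_cases hs : PySem.Chars.isspace c
    · rw [if_pos hs] at ht
      exact (ih r.length (by simp) r rfl t ht).trans (List.suffix_cons c r).isInfix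
    · rw [if_neg hs] at ht
      rcases List.mem_cons.mp ht with rfl | htl
      · exact (List.cons_prefix_cons.mpr ⟨rfl, List.takeWhile_prefix _⟩).isInfix
      · have h1 := ih (r.dropWhile (fun d => !PySem.Chars.isspace d)).length
          (by simpa using Nat.lt_succ_of_le (List.length_dropWhile_le _ _)) _ rfl t htl
        exact h1.trans ((List.dropWhile_suffix _).isInfix.trans (List.suffix_cons c r).isInfix)

theorem pvSent_infix_tok : ∀ (s : List Char), pvSent <:+: s → ∃ t ∈ pvToks s, pvTok t = true := by
  intro s
  induction hn : s.length using Nat.strong_induction_on generalizing s with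
  | _ n ih =>
  subst hn
  match s with
  | [] => intro h; exact absurd (List.infix_nil.mp h) pvSent_ne_nil
  | c :: r =>
    intro h
    by_cases hs : PySem.Chars.isspace c
    · -- sentinel cannot start at the space
      have hnp : ¬ pvSent <+: c :: r := by
        intro hp
        obtain ⟨x, xs, hsent⟩ : ∃ x xs, pvSent = x :: xs := by
          rcases hx : pvSent with _ | ⟨x, xs⟩
          · exact absurd hx pvSent_ne_nil
          · exact ⟨x, xs, rfl⟩
        rw [hsent] at hp
        have hx1 := (List.cons_prefix_cons.mp hp).1
        have hns := pvSent_nonspace x (by rw [hsent]; simp)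
        rw [hx1] at hns
        rw [hns] at hs
        simp at hs
      rcases List.infix_cons_iff.mp h with hp | hi
      · exact absurd hp hnp
      · obtain ⟨t, ht, hpt⟩ := ih r.length (by simp) r rfl hi
        exact ⟨t, by rw [pvToks, if_pos hs]; exact ht, hpt⟩
    · -- first token is c :: takeWhile, rest after dropWhile
      have hdecomp : c :: r = (c :: r.takeWhile (fun d => !PySem.Chars.isspace d)) ++
          r.dropWhile (fun d => !PySem.Chars.isspace d) := by
        simp [List.takeWhile_append_dropWhile]
      set tw := r.takeWhile (fun d => !PySem.Chars.isspace d) with htw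
      set dw := r.dropWhile (fun d => !PySem.Chars.isspace d) with hdw
      have hmem1 : (c :: tw) ∈ pvToks (c :: r) := by
        rw [pvToks, if_neg hs]
        simp only [List.mem_cons]
        exact Or.inl (by rw [htw])
      rcases hzz : dw with _ | ⟨w, dw'⟩
      · -- no tail: sentinel is inside the single token
        have : pvSent <:+: (c :: tw) := by
          rw [hdecomp, hzz, List.append_nil] at h
          exact h
        exact ⟨c :: tw, hmem1, (PySem.Chars.isIn_iff_infix _ _).mpr this⟩
      · have hw : PySem.Chars.isspace w = true := by
          have := dropWhile_head_false (p := fun d => !PySem.Chars.isspace d) (l := r) (hdw ▸ hzz)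
          simpa using this
        rw [hdecomp, hzz] at h
        rcases pv_cross h with h1 | h2 | h3
        · exact ⟨c :: tw, hmem1, (PySem.Chars.isIn_iff_infix _ _).mpr h1⟩
        · obtain ⟨t, ht, hpt⟩ := ih (w :: dw').length
            (by
              have : dw.length ≤ r.length := hdw ▸ List.length_dropWhile_le _ _
              rw [hzz] at this
              simpa using Nat.lt_succ_of_le this) (w :: dw') rfl h2
          refine ⟨t, ?_, hpt⟩
          rw [pvToks, if_neg hs]
          right
          rw [show List.dropWhile (fun d => !PySem.Chars.isspace d) r = w :: dw' from by rw [← hdw, hzz]]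
          exact ht
        · have := pvSent_nonspace w h3
          rw [this] at hw
          simp at hw

theorem pvSent_in_iff_tok (ℓ : List Char) :
    PySem.Chars.isIn pvSent ℓ = (pvToks ℓ).any pvTok := by
  rcases hany : (pvToks ℓ).any pvTok with _ | _
  · rw [PySem.Chars.isIn_eq_false_iff]
    intro hin
    obtain ⟨t, ht, hp⟩ := pvSent_infix_tok ℓ hin
    have := List.any_eq_true.mpr ⟨t, ht, hp⟩
    rw [hany] at this
    cases this
  · rw [List.any_eq_true] at hany
    obtain ⟨t, ht, hp⟩ := hany
    have h1 := (PySem.Chars.isIn_iff_infix _ _).mp hp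
    exact (PySem.Chars.isIn_iff_infix _ _).mpr (h1.trans (pvToks_infix ℓ t ht))

theorem find?_flatMap {α β : Type} (f : α → List β) (p : β → Bool) (ls : List α) :
    (ls.flatMap f).find? p = ((ls.find? fun l => (f l).any p).bind fun l => (f l).find? p) := by
  induction ls with
  | nil => rfl
  | cons l ls ih =>
    rw [List.flatMap_cons, List.find?_append, List.find?_cons]
    by_cases h : (f l).any p
    · obtain ⟨x, hx, hpx⟩ := List.any_eq_true.mp h
      obtain ⟨y, hy⟩ := Option.isSome_iff_exists.mp (List.find?_isSome.mpr ⟨x, hx, hpx⟩)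
      simp [h, hy]
    · have hnone : (f l).find? p = none := by
        rw [List.find?_eq_none]
        intro x hx
        by_contra hpx
        exact h (List.any_eq_true.mpr ⟨x, hx, by simpa using hpx⟩)
      simp [h, hnone, ih]

theorem key_chars (cs : List Char) :
    (PySem.Chars.split₀ cs).find? pvTok =
      ((PySem.Chars.splitlines cs).find? pvTok).bind
        (fun ℓ => (PySem.Chars.split₀ ℓ).find? pvTok) := by
  rw [split₀_eq_pvToks, pvToks_splitlines, find?_flatMap]
  have h1 : (fun l => (pvToks l).any pvTok) = pvTok := by
    funext l
    rw [← pvSent_in_iff_tok]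
    rfl
  rw [h1]
  congr 1
  funext ℓ
  rw [split₀_eq_pvToks]

theorem key_str (s : String) :
    (PySem.Str.split₀ s).find? (fun t => PySem.Str.isIn ".my_screen_session" t) =
      ((PySem.Str.splitlines s).find? (fun l => PySem.Str.isIn ".my_screen_session" l)).bind
        (fun wl => (PySem.Str.split₀ wl).find? (fun t => PySem.Str.isIn ".my_screen_session" t)) := by
  have hpred : (pvTok ∘ String.toList) = (fun t => PySem.Str.isIn ".my_screen_session" t) := by
    funext t
    simp [pvTok, pvSent, PySem.Str.isIn_eq]
  have hmap : ∀ (ls : List String),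
      (ls.map String.toList).find? pvTok = (ls.find? (fun t => PySem.Str.isIn ".my_screen_session" t)).map String.toList := by
    intro ls
    rw [List.find?_map, hpred]
  have hinj : Function.Injective String.toList := by
    intro a b h
    exact String.toList_inj.mp h
  apply Option.map_injective hinj
  rw [Option.map_bind]
  have lhs : ((PySem.Str.split₀ s).find? (fun t => PySem.Str.isIn ".my_screen_session" t)).map String.toList
      = (PySem.Chars.split₀ s.toList).find? pvTok := by
    rw [← PySem.Str.split₀_map_toList, hmap]
  have outer : ((PySem.Str.splitlines s).find? (fun l => PySem.Str.isIn ".my_screen_session" l)).map String.toList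
      = (PySem.Chars.splitlines s.toList).find? pvTok := by
    rw [← PySem.Str.splitlines_map_toList, hmap]
  rw [lhs, key_chars]
  rw [← outer]
  cases (PySem.Str.splitlines s).find? (fun l => PySem.Str.isIn ".my_screen_session" l) with
  | none => rfl
  | some wl =>
    simp only [Option.map_some, Option.bind_some, Function.comp_apply]
    rw [← PySem.Str.split₀_map_toList, List.find?_map, hpred]

-- ===== VERDICT (by name: the statement is the Claim_ definition above) =====
theorem parse_screen_sesssion_id_spec : Claim_equal_parse_screen_sesssion_id := by
  intro s _ _
  unfold Spec_parse_screen_sesssion_id parse_screen_sesssion_id parse_screen_sesssion_id_alt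
  rw [key_str s]
  cases (PySem.Str.splitlines s).find? (fun l => PySem.Str.isIn ".my_screen_session" l) with
  | none => rfl
  | some wl =>
    simp only [Option.bind_some]
    cases (PySem.Str.split₀ wl).find? (fun t => PySem.Str.isIn ".my_screen_session" t) <;> rfl
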